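-- pv_equiv track=rewrite | github.com/ThomasSYT/Active-learning-material | code/data_processing/__init__.py | get_index_dict
-- ===== SOURCE A (Python) =====
-- def get_index_dict(input_data):
--     """Create index - word/label dict from list input
--
--     @params : List of lists
--     @returns : Index - Word/label dictionary
--     """
--     result = dict()
--     vocab = set()
--     i = 1
--     # Flatten list and get indices
--     for element in [word for document in input_data for word in document]:
--         if element not in vocab:
--             result[i]=element
--             i+=1
--             vocab.add(element)
--     return result
-- ===== SOURCE B (Python) =====
-- def get_index_dict(input_data):
--     """Create index - word/label dict from list input
--
--     @params : List of lists
--     @returns : Index - Word/label dictionary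
--     """
--     flat = [word for document in input_data for word in document]
--     first = {}
--     for pos, word in reversed(list(enumerate(flat))):
--         first[word] = pos
--     unique = sorted(first, key=first.get)
--     return dict(enumerate(unique, 1))
-- ===== Notes on version B (the rewrite author's own statement) =====
-- stated objective: alternative
-- what changed: Instead of A's single ordered pass with a seen-set and a hand-maintained counter, B computes each word's first position with a reversed-enumerate overwrite dict, sorts the distinct words by that position to recover first-seen order, and builds the result from enumerate(unique, 1).
import Mathlib
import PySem

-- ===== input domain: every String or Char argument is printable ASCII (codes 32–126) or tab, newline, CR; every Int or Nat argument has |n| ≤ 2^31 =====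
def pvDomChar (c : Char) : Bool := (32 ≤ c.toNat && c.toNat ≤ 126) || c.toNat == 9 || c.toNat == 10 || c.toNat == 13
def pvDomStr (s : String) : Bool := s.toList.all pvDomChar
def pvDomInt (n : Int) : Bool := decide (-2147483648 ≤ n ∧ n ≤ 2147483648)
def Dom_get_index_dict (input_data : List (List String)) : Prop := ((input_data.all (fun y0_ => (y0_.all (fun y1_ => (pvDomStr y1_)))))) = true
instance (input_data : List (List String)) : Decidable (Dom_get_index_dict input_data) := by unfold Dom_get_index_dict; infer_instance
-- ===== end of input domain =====

-- B replaces A's single-pass seen-set+counter loop: it builds a word→first-position dict by a reversed overwrite pass, sorts the distinct words by that position, and enumerates from 1 (alternative algorithm; return value proved equal).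


-- ===== PORT A =====
-- the loop body: one state (result, vocab, i), branches in source order
def getIndexDictStep (st : PySem.Dict Int String × PySem.Set String × Int) (element : String) :
    PySem.Dict Int String × PySem.Set String × Int :=
  if ¬ PySem.Set.contains st.2.1 element then
    (st.1.insert st.2.2 element, PySem.Set.add st.2.1 element, st.2.2 + 1)
  else st

def get_index_dict (input_data : List (List String)) : List (Int × String) :=
  -- result = dict(); vocab = set(); i = 1; for element in [word for document in input_data for word in document]: …
  ((input_data.flatMap (fun document => document.map (fun word => word))).foldl
      getIndexDictStep (PySem.Dict.empty, PySem.Set.empty, 1)).1.items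

-- ===== PORT B =====
def get_index_dict_alt (input_data : List (List String)) : List (Int × String) :=
  let flat := input_data.flatMap (fun document => document.map (fun word => word))
  -- for pos, word in reversed(list(enumerate(flat))): first[word] = pos
  let first := ((PySem.List.enumerate flat 0).reverse).foldl
      (fun d p => d.insert p.2 p.1) PySem.Dict.empty
  -- first.get(w): w drawn from first's own keys is never missing, so getD 0 is exact here
  let unique := PySem.List.sorted first.keys (fun w => (first.get? w).getD 0) false
  (PySem.Dict.ofList (PySem.List.enumerate unique 1)).items

-- ===== PRECONDITION & SPEC =====
def Spec_get_index_dict (input_data : List (List String)) (out : List (Int × String)) : Prop := out = get_index_dict_alt input_data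
instance (input_data : List (List String)) (out : List (Int × String)) : Decidable (Spec_get_index_dict input_data out) := by unfold Spec_get_index_dict; infer_instance

-- ===== CLAIM (what is proved, stated in full; the proofs are below) =====
def Claim_equal_get_index_dict : Prop := ∀ (input_data : List (List String)), Dom_get_index_dict input_data → Spec_get_index_dict input_data (get_index_dict input_data)

-- ===== LEMMAS AND PROOFS =====

-- the new (first-occurrence, not-yet-in-v) elements of l, in order
def newElems (v : PySem.Set String) : List String → List String
  | [] => []
  | x :: xs => if PySem.Set.contains v x then newElems v xs else x :: newElems (PySem.Set.add v x) xs

theorem foldl_add_eq_append_newElems (l : List String) (v : PySem.Set String) :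
    l.foldl PySem.Set.add v = v ++ newElems v l := by
  induction l generalizing v with
  | nil => simp [newElems]
  | cons x xs ih =>
    simp only [List.foldl_cons, newElems]
    by_cases h : PySem.Set.contains v x
    · have hm : x ∈ v := by simpa [PySem.Set.contains] using h
      have hadd : PySem.Set.add v x = v := by simp [PySem.Set.add, hm]
      rw [hadd, ih, h]; simp
    · have hm : x ∉ v := by simpa [PySem.Set.contains] using h
      rw [if_neg h, ih]
      simp [PySem.Set.add, hm]

theorem dedup_eq_newElems (l : List String) :
    PySem.List.dedup l = newElems PySem.Set.empty l := by
  have := foldl_add_eq_append_newElems l PySem.Set.empty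
  simpa [PySem.List.dedup_eq_ofList, PySem.Set.ofList_eq_foldl, PySem.Set.empty] using this

theorem foldA_items (l : List String) (r : PySem.Dict Int String) (v : PySem.Set String) (i : Int)
    (hk : ∀ k ∈ r.keys, k < i) :
    (l.foldl getIndexDictStep (r, v, i)).1.items = r.items ++ PySem.List.enumerate (newElems v l) i := by
  induction l generalizing r v i with
  | nil => simp [newElems]
  | cons x xs ih =>
    simp only [List.foldl_cons, getIndexDictStep, newElems]
    by_cases h : PySem.Set.contains v x = true
    · rw [if_neg (not_not_intro h), if_pos h]
      exact ih r v i hk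
    · have hnc : r.contains i = false := by
        rcases hcon : r.contains i with _ | _
        · rfl
        · exfalso
          have : i ∈ r.keys := (PySem.Dict.contains_iff_mem_keys r i).mp hcon
          exact absurd (hk i this) (lt_irrefl i)
      rw [if_pos h, if_neg h]
      rw [ih (r.insert i x) (PySem.Set.add v x) (i + 1) ?_]
      · rw [PySem.Dict.items_insert, hnc, PySem.List.enumerate_cons]
        simp
      · intro k hkmem
        rw [PySem.Dict.mem_keys_insert] at hkmem
        rcases hkmem with rfl | hkmem
        · omega
        · have := hk k hkmem; omega

-- index of an element absent from the prefix: shift by the prefix length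
theorem index?_append_of_not_mem (pre t : List String) (w : String) (h : w ∉ pre) :
    PySem.List.index? (pre ++ t) w = (PySem.List.index? t w).map (· + pre.length) := by
  induction pre with
  | nil => simp
  | cons p ps ih =>
    have hne : p ≠ w := fun he => h (he ▸ List.mem_cons_self)
    rw [List.cons_append, PySem.List.index?_cons_of_ne _ hne,
        ih (fun hm => h (List.mem_cons_of_mem _ hm))]
    cases PySem.List.index? t w with
    | none => rfl
    | some k => simp [Nat.add_assoc]

-- the elements newElems v l contributes are in strictly increasing first-position order in pre ++ l,
-- and all of them first occur at or after position pre.length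
theorem newElems_index_mono (F : List String) : ∀ (l pre : List String) (v : PySem.Set String),
    F = pre ++ l → (∀ w, w ∈ v ↔ w ∈ pre) →
    (newElems v l).Pairwise
        (fun a b => (PySem.List.index? F a).getD 0 < (PySem.List.index? F b).getD 0) ∧
    ∀ x ∈ newElems v l, pre.length ≤ (PySem.List.index? F x).getD 0 := by
  intro l
  induction l with
  | nil =>
    intro pre v _ _
    constructor
    · exact List.Pairwise.nil
    · intro x hx; exact absurd hx (by simp [newElems])
  | cons x xs ih =>
    intro pre v hF hv
    have hF' : F = (pre ++ [x]) ++ xs := by simp [hF]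
    by_cases h : PySem.Set.contains v x = true
    · have hxv : x ∈ v := by simpa [PySem.Set.contains] using h
      have hadd : PySem.Set.add v x = v := by simp [PySem.Set.add, hxv]
      have hv' : ∀ w, w ∈ v ↔ w ∈ pre ++ [x] := by
        intro w
        simp only [List.mem_append, List.mem_singleton]
        constructor
        · exact fun hw => Or.inl ((hv w).mp hw)
        · rintro (hw | rfl)
          · exact (hv w).mpr hw
          · exact hxv
      obtain ⟨hp, hb⟩ := ih (pre ++ [x]) v hF' hv'
      constructor
      · simp only [newElems]; rw [if_pos h]; exact hp
      · intro y hy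
        simp only [newElems] at hy; rw [if_pos h] at hy
        have := hb y hy
        simp only [List.length_append, List.length_cons, List.length_nil] at this
        omega
    · have hxv : x ∉ v := by simpa [PySem.Set.contains] using h
      have hxpre : x ∉ pre := fun hm => hxv ((hv x).mpr hm)
      have hkey : (PySem.List.index? F x).getD 0 = pre.length := by
        rw [hF, index?_append_of_not_mem pre (x :: xs) x hxpre,
            PySem.List.index?_cons_self]
        simp
      have hadd : PySem.Set.add v x = v ++ [x] := by simp [PySem.Set.add, hxv]
      have hv' : ∀ w, w ∈ PySem.Set.add v x ↔ w ∈ pre ++ [x] := by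
        intro w
        rw [hadd]
        simp only [List.mem_append, List.mem_singleton]
        exact or_congr_left (hv w)
      obtain ⟨hp, hb⟩ := ih (pre ++ [x]) (PySem.Set.add v x) hF' hv'
      have hb' : ∀ y ∈ newElems (PySem.Set.add v x) xs,
          pre.length + 1 ≤ (PySem.List.index? F y).getD 0 := by
        intro y hy
        have := hb y hy
        simp only [List.length_append, List.length_cons, List.length_nil] at this
        omega
      constructor
      · simp only [newElems]; rw [if_neg h]
        exact List.Pairwise.cons
          (fun y hy => by rw [hkey]; have := hb' y hy; omega) hp
      · intro y hy
        simp only [newElems] at hy; rw [if_neg h] at hy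
        rcases List.mem_cons.mp hy with rfl | hy'
        · omega
        · have := hb' y hy'; omega

-- last-write-wins of the insert loop, phrased on the reversed list
theorem get?_foldl_insert_swap (l : List (Int × String)) (d : PySem.Dict String Int) (w : String) :
    (l.foldl (fun d p => d.insert p.2 p.1) d).get? w =
      match l.reverse.find? (fun p => p.2 == w) with
      | some p => some p.1
      | none => d.get? w := by
  induction l generalizing d with
  | nil => simp
  | cons a l' ih =>
    rw [List.foldl_cons, ih, List.reverse_cons, List.find?_append]
    cases hf : l'.reverse.find? (fun p => p.2 == w) with
    | some p => simp
    | none =>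
      by_cases hw : a.2 = w
      · subst hw; simp [PySem.Dict.get?_insert_self]
      · rw [PySem.Dict.get?_insert_of_ne d a.1 (fun he => hw he.symm)]
        simp [hw]

-- the first enumerate pair carrying w sits at w's first index
theorem find?_enumerate_snd (flat : List String) (w : String) : ∀ (s : Int),
    (PySem.List.enumerate flat s).find? (fun p => p.2 == w) =
      (PySem.List.index? flat w).map (fun k => ((s + k : Int), w)) := by
  induction flat with
  | nil => intro s; simp [PySem.List.enumerate_nil]
  | cons x xs ih =>
    intro s
    rw [PySem.List.enumerate_cons]
    by_cases hw : x = w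
    · subst hw
      rw [List.find?_cons_of_pos (by simp), PySem.List.index?_cons_self]
      simp
    · rw [List.find?_cons_of_neg (by simpa using hw), ih (s + 1),
          PySem.List.index?_cons_of_ne _ hw]
      cases PySem.List.index? xs w with
      | none => rfl
      | some k => simp; ring

-- the dict first maps every word of flat to its first index
theorem get?_first_dict (flat : List String) (w : String) :
    (((PySem.List.enumerate flat 0).reverse).foldl
        (fun d p => d.insert p.2 p.1) PySem.Dict.empty).get? w =
      (PySem.List.index? flat w).map (fun k => (k : Int)) := by
  rw [get?_foldl_insert_swap, List.reverse_reverse, find?_enumerate_snd flat w 0]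
  cases PySem.List.index? flat w with
  | none => simp
  | some k => simp

theorem getD_first_dict (flat : List String) (w : String) (hw : w ∈ flat) :
    ((((PySem.List.enumerate flat 0).reverse).foldl
        (fun d p => d.insert p.2 p.1) PySem.Dict.empty).get? w).getD 0 =
      (((PySem.List.index? flat w).getD 0 : Nat) : Int) := by
  rw [get?_first_dict]
  cases hk : PySem.List.index? flat w with
  | none => exact absurd hw ((PySem.List.index?_eq_none_iff flat w).mp hk)
  | some k => rfl

-- the keys of first are the distinct words of flat (in some order)
theorem keys_first_dict (flat : List String) :
    (((PySem.List.enumerate flat 0).reverse).foldl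
        (fun d p => d.insert p.2 p.1) PySem.Dict.empty).keys =
      PySem.Set.ofList flat.reverse := by
  have h := PySem.Dict.keys_foldl_insert_key ((PySem.List.enumerate flat 0).reverse)
      (fun p => p.2) (fun _ p => p.1) PySem.Dict.empty
  rw [h]
  have hm : ((PySem.List.enumerate flat 0).reverse).map (fun p => p.2) = flat.reverse := by
    rw [List.map_reverse, PySem.List.map_snd_enumerate]
  rw [hm]
  simp [PySem.Set.update, PySem.Dict.keys_empty, PySem.Set.ofList_eq_foldl]

theorem sorted_keys_eq_dedup (flat : List String) :
    PySem.List.sorted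
        ((((PySem.List.enumerate flat 0).reverse).foldl
            (fun d p => d.insert p.2 p.1) PySem.Dict.empty).keys)
        (fun w => ((((PySem.List.enumerate flat 0).reverse).foldl
            (fun d p => d.insert p.2 p.1) PySem.Dict.empty).get? w).getD 0) false =
      PySem.List.dedup flat := by
  apply PySem.List.sorted_eq_of_perm_of_pairwise_lt
  · rw [keys_first_dict]
    rw [List.perm_ext_iff_of_nodup (PySem.List.nodup_dedup flat)
        (PySem.Set.nodup_ofList flat.reverse)]
    intro a
    rw [PySem.List.mem_dedup, PySem.Set.mem_ofList, List.mem_reverse]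
  · rw [dedup_eq_newElems]
    have hmono := (newElems_index_mono flat flat [] PySem.Set.empty (by simp)
      (by intro w; simp [PySem.Set.empty])).1
    refine hmono.imp_of_mem ?_
    intro a b ha hb hlt
    have ha' : a ∈ flat := by
      have h := PySem.List.mem_dedup flat a
      rw [dedup_eq_newElems] at h; exact h.mp ha
    have hb' : b ∈ flat := by
      have h := PySem.List.mem_dedup flat b
      rw [dedup_eq_newElems] at h; exact h.mp hb
    rw [getD_first_dict flat a ha', getD_first_dict flat b hb']
    exact_mod_cast hlt

-- dict(enumerate(unique, 1)): the keys are fresh and distinct, so items is the pair list itself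
theorem items_ofList_enumerate (l : List String) (s : Int) :
    (PySem.Dict.ofList (PySem.List.enumerate l s)).items = PySem.List.enumerate l s := by
  have hnd : ((PySem.List.enumerate l s).map (fun p => p.1)).Nodup := by
    exact (List.pairwise_map).mpr
      ((PySem.List.pairwise_lt_enumerate l s).imp (fun h => ne_of_lt h))
  have h := PySem.Dict.items_foldl_insert_fresh (PySem.List.enumerate l s)
      (fun p => p.1) (fun p => p.2) PySem.Dict.empty
      (by intro a _; simp) hnd
  calc (PySem.Dict.ofList (PySem.List.enumerate l s)).items
      = ((PySem.List.enumerate l s).foldl (fun d p => d.insert p.1 p.2) PySem.Dict.empty).items := rfl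
    _ = PySem.List.enumerate l s := by rw [h]; simp [PySem.Dict.empty]

-- ===== VERDICT (by name: the statement is the Claim_ definition above) =====
theorem get_index_dict_spec : Claim_equal_get_index_dict := by
  intro input_data _
  unfold Spec_get_index_dict get_index_dict get_index_dict_alt
  show _ = (PySem.Dict.ofList (PySem.List.enumerate (PySem.List.sorted
      ((((PySem.List.enumerate (input_data.flatMap (fun document => document.map (fun word => word))) 0).reverse).foldl
          (fun d p => d.insert p.2 p.1) PySem.Dict.empty).keys)
      (fun w => ((((PySem.List.enumerate (input_data.flatMap (fun document => document.map (fun word => word))) 0).reverse).foldl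
          (fun d p => d.insert p.2 p.1) PySem.Dict.empty).get? w).getD 0)
      false) 1)).items
  rw [foldA_items _ PySem.Dict.empty PySem.Set.empty 1 (by simp [PySem.Dict.keys_empty])]
  rw [sorted_keys_eq_dedup, items_ofList_enumerate, dedup_eq_newElems]
  simp [PySem.Dict.empty]
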